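-- pv_equiv track=rewrite | github.com/Rupak143/DAA | 37. Container loader problem.py | container_loader
-- ===== SOURCE A (Python) =====
-- def container_loader(items, container_capacity):
--     containers = []
--     current_container = []
--     for item in items:
--         if sum(current_container) + item <= container_capacity:
--             current_container.append(item)
--         else:
--             containers.append(current_container)
--             current_container = [item]
--     containers.append(current_container)
--     return containers
-- ===== SOURCE B (Python) =====
-- def container_loader(items, container_capacity):
--     n = len(items)
--
--     def extend(i, s):
--         # advance i while the next item still fits on top of running sum s
--         while i < n and s + items[i] <= container_capacity:
--             s += items[i]
--             i += 1
--         return i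
--
--     j = extend(0, 0)
--     containers = [items[0:j]]
--     i = j
--     while i < n:
--         # a new container is forced to start with items[i], then extends greedily
--         j = extend(i + 1, items[i])
--         containers.append(items[i:j])
--         i = j
--     return containers
-- ===== Notes on version B (the rewrite author's own statement) =====
-- stated objective: faster
-- what changed: B computes container boundary indices with an index-advancing greedy scan (a reusable extend(i,s) routine) and emits each container as a slice items[i:j], instead of A's element-by-element loop that re-sums the growing current container with sum() at every item.
import Mathlib
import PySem

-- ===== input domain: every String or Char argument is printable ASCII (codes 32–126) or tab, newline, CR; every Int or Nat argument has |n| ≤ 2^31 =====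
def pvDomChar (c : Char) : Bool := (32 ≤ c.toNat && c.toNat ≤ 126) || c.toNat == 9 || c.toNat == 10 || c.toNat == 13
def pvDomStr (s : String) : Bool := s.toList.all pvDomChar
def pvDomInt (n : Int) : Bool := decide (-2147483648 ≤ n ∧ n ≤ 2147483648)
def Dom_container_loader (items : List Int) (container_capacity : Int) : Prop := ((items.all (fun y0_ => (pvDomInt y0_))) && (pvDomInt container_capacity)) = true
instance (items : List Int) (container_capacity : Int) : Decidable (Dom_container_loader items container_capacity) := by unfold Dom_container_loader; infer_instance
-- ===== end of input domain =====

-- B computes container boundary indices with a greedy index scan and slices the input, replacing A's per-item re-summing (O(n^2) -> O(n)).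


-- ===== PORT A =====
-- loop over items, re-summing the current container each step (as A does with sum())
def container_loader (items : List Int) (container_capacity : Int) : List (List Int) :=
  let st := items.foldl
    (fun (st : List (List Int) × List Int) item =>
      if st.2.sum + item ≤ container_capacity then (st.1, st.2 ++ [item])
      else (st.1 ++ [st.2], [item]))
    ([], [])
  st.1 ++ [st.2]

-- ===== PORT B =====
-- B's extend(i, s): advance i while the next item fits on top of running sum s
def pvExtend (items : List Int) (cap : Int) (i : Nat) (s : Int) : Nat :=
  if h : i < items.length then
    if s + items[i] ≤ cap then pvExtend items cap (i + 1) (s + items[i]) else i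
  else i
termination_by items.length - i

-- pvExtend never moves the index backwards (termination fact for the outer loop)
theorem pvExtend_ge (items : List Int) (cap : Int) (i : Nat) (s : Int) :
    i ≤ pvExtend items cap i s := by
  unfold pvExtend
  split
  · split
    · exact Nat.le_trans (Nat.le_succ i) (pvExtend_ge items cap (i + 1) _)
    · exact Nat.le_refl i
  · exact Nat.le_refl i
termination_by items.length - i

-- B's outer while loop: each pass emits the forced-start container items[i:j]
def pvPackLoop (items : List Int) (cap : Int) (i : Nat) : List (List Int) :=
  if h : i < items.length then
    let j := pvExtend items cap (i + 1) items[i]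
    PySem.List.slice items (some (i : Int)) (some (j : Int)) :: pvPackLoop items cap j
  else []
termination_by items.length - i
decreasing_by have := pvExtend_ge items cap (i + 1) items[i]; omega

def container_loader_alt (items : List Int) (container_capacity : Int) : List (List Int) :=
  let j := pvExtend items container_capacity 0 0
  PySem.List.slice items (some (0 : Int)) (some (j : Int)) :: pvPackLoop items container_capacity j

-- ===== PRECONDITION & SPEC =====
def Spec_container_loader (items : List Int) (container_capacity : Int) (out : List (List Int)) : Prop := out = container_loader_alt items container_capacity
instance (items : List Int) (container_capacity : Int) (out : List (List Int)) : Decidable (Spec_container_loader items container_capacity out) := by unfold Spec_container_loader; infer_instance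

-- ===== CLAIM (what is proved, stated in full; the proofs are below) =====
def Claim_equal_container_loader : Prop := ∀ (items : List Int) (container_capacity : Int), Dom_container_loader items container_capacity → Spec_container_loader items container_capacity (container_loader items container_capacity)

-- ===== LEMMAS AND PROOFS =====

-- A's fold step, abbreviated for the lemmas
def pvStepA (cap : Int) (st : List (List Int) × List Int) (item : Int) : List (List Int) × List Int :=
  if st.2.sum + item ≤ cap then (st.1, st.2 ++ [item])
  else (st.1 ++ [st.2], [item])

-- natural-number slice of items
def pvSliceN (items : List Int) (i j : Nat) : List Int := (items.drop i).take (j - i)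

theorem pvSliceN_self (items : List Int) (i : Nat) : pvSliceN items i i = [] := by
  simp [pvSliceN]

theorem slice_eq_pvSliceN (items : List Int) (i j : Nat) :
    PySem.List.slice items (some (i : Int)) (some (j : Int)) = pvSliceN items i j := by
  rw [PySem.List.slice_natCast]; rfl

theorem pvSliceN_cons (items : List Int) (i j : Nat) (h : i < items.length) (hij : i < j) :
    pvSliceN items i j = items[i] :: pvSliceN items (i + 1) j := by
  unfold pvSliceN
  rw [List.drop_eq_getElem_cons h]
  have : j - i = (j - (i + 1)) + 1 := by omega
  rw [this, List.take_succ_cons]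

-- extend phase: A's fold walks exactly over the items pvExtend consumes,
-- and at the stopping index the next item no longer fits
theorem extend_phase (items : List Int) (cap : Int) (i : Nat) (cur : List Int)
    (conts : List (List Int)) :
    (items.drop i).foldl (pvStepA cap) (conts, cur)
      = (items.drop (pvExtend items cap i cur.sum)).foldl (pvStepA cap)
          (conts, cur ++ pvSliceN items i (pvExtend items cap i cur.sum))
    ∧ (∀ h : pvExtend items cap i cur.sum < items.length,
        ¬ ((cur ++ pvSliceN items i (pvExtend items cap i cur.sum)).sum
            + items[pvExtend items cap i cur.sum] ≤ cap)) := by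
  by_cases h : i < items.length
  · by_cases hfit : cur.sum + items[i] ≤ cap
    · have hE : pvExtend items cap i cur.sum
          = pvExtend items cap (i + 1) (cur ++ [items[i]]).sum := by
        rw [pvExtend]; simp [h, hfit]
      have ih := extend_phase items cap (i + 1) (cur ++ [items[i]]) conts
      have hj1 : i + 1 ≤ pvExtend items cap (i + 1) (cur ++ [items[i]]).sum :=
        pvExtend_ge items cap (i + 1) _
      have hij : i < pvExtend items cap i cur.sum := by omega
      rw [List.drop_eq_getElem_cons h]
      simp only [List.foldl_cons]
      have hstep : pvStepA cap (conts, cur) items[i] = (conts, cur ++ [items[i]]) := by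
        simp [pvStepA, hfit]
      rw [hstep, pvSliceN_cons items i _ h hij, hE]
      simpa using ih
    · have hE : pvExtend items cap i cur.sum = i := by rw [pvExtend]; simp [h, hfit]
      rw [hE, pvSliceN_self]
      exact ⟨by simp, fun _ => by simpa using hfit⟩
  · have hE : pvExtend items cap i cur.sum = i := by rw [pvExtend]; simp [h]
    rw [hE, pvSliceN_self]
    exact ⟨by simp, fun hlt => absurd hlt h⟩
termination_by items.length - i
decreasing_by omega

-- outer phase: the remaining fold produces conts ++ the containers B emits
theorem outer_phase (items : List Int) (cap : Int) (i : Nat) (cur : List Int)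
    (conts : List (List Int)) :
    (let r := (items.drop i).foldl (pvStepA cap) (conts, cur); r.1 ++ [r.2])
      = conts ++ (cur ++ pvSliceN items i (pvExtend items cap i cur.sum))
          :: pvPackLoop items cap (pvExtend items cap i cur.sum) := by
  obtain ⟨he, hstop⟩ := extend_phase items cap i cur conts
  have hij : i ≤ pvExtend items cap i cur.sum := pvExtend_ge items cap i _
  by_cases hj : pvExtend items cap i cur.sum < items.length
  · have hnot := hstop hj
    have ih := outer_phase items cap (pvExtend items cap i cur.sum + 1)
        [items[pvExtend items cap i cur.sum]]
        (conts ++ [cur ++ pvSliceN items i (pvExtend items cap i cur.sum)])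
    have hj1 : pvExtend items cap i cur.sum + 1
        ≤ pvExtend items cap (pvExtend items cap i cur.sum + 1)
            items[pvExtend items cap i cur.sum] :=
      pvExtend_ge items cap _ _
    have hcons : pvSliceN items (pvExtend items cap i cur.sum)
          (pvExtend items cap (pvExtend items cap i cur.sum + 1)
            items[pvExtend items cap i cur.sum])
        = items[pvExtend items cap i cur.sum]
          :: pvSliceN items (pvExtend items cap i cur.sum + 1)
              (pvExtend items cap (pvExtend items cap i cur.sum + 1)
                items[pvExtend items cap i cur.sum]) :=
      pvSliceN_cons items _ _ hj (by omega)
    simp only [he, List.drop_eq_getElem_cons hj, List.foldl_cons]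
    have hstep : pvStepA cap
        (conts, cur ++ pvSliceN items i (pvExtend items cap i cur.sum))
        items[pvExtend items cap i cur.sum]
        = (conts ++ [cur ++ pvSliceN items i (pvExtend items cap i cur.sum)],
           [items[pvExtend items cap i cur.sum]]) := by
      have hnot' := hnot
      simp only [List.sum_append] at hnot'
      simp only [pvStepA]
      rw [if_neg (by simpa using hnot')]
    rw [hstep, ih]
    conv_rhs => rw [pvPackLoop.eq_def, dif_pos hj]
    simp [slice_eq_pvSliceN, hcons]
  · rw [pvPackLoop.eq_def]
    simp only [hj, dif_neg, not_false_iff]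
    have hd : items.drop (pvExtend items cap i cur.sum) = [] :=
      List.drop_eq_nil_of_le (by omega)
    simp [he, hd]
termination_by items.length - i
decreasing_by omega

-- ===== VERDICT (by name: the statement is the Claim_ definition above) =====
theorem container_loader_spec : Claim_equal_container_loader := by
  intro items cap _
  unfold Spec_container_loader container_loader container_loader_alt
  have h := outer_phase items cap 0 [] []
  simp only [List.drop_zero] at h
  rw [show (fun (st : List (List Int) × List Int) item =>
        if st.2.sum + item ≤ cap then (st.1, st.2 ++ [item])
        else (st.1 ++ [st.2], [item])) = pvStepA cap from rfl]
  rw [h]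
  simp [pvSliceN]
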